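-- pv_equiv track=rewrite | github.com/qianyan20040721-hub/offline_asr-CPU- | ASR/speaker_ASR_onnx.py | tokenize_mixed
-- ===== SOURCE A (Python) =====
-- from typing import Any, Dict, List, Sequence
--
-- def tokenize_mixed(text: str) -> List[str]:
--     tokens, buf = [], []
--     for ch in text:
--         if 'a' <= ch.lower() <= 'z':
--             buf.append(ch)
--         else:
--             if buf:
--                 tokens.append("".join(buf))
--                 buf = []
--             tokens.append(ch)
--     if buf:
--         tokens.append("".join(buf))
--     return tokens
-- ===== SOURCE B (Python) =====
-- from typing import List
--
-- def tokenize_mixed(text: str) -> List[str]: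
--     if not text:
--         return []
--     def is_let(ch: str) -> bool:
--         return 'a' <= ch.lower() <= 'z'
--     # stage 1: token start positions from a pairwise scan of adjacent characters
--     starts = [0] + [i + 1 for i, (x, y) in enumerate(zip(text, text[1:]))
--                     if not (is_let(x) and is_let(y))]
--     # stage 2: cut the text at those positions
--     ends = starts[1:] + [len(text)]
--     return [text[a:b] for a, b in zip(starts, ends)]
-- ===== Notes on version B (the rewrite author's own statement) =====
-- stated objective: alternative
-- what changed: Replaces A's single-pass buffer accumulate/flush loop by two staged passes: first compute all token start positions from a pairwise scan of adjacent characters (a boundary wherever the two neighbours are not both letters), then slice the text between consecutive cut positions.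
import Mathlib
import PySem

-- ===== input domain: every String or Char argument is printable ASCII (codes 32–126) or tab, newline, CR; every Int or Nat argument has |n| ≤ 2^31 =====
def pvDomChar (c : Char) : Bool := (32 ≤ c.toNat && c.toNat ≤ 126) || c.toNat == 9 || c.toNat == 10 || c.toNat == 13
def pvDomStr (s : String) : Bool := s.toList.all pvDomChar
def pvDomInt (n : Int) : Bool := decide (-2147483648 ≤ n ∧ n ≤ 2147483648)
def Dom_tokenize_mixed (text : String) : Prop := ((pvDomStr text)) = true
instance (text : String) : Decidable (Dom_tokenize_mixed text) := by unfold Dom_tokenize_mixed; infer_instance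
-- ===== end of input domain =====

-- B replaces A's streaming buffer-accumulate/flush loop by two staged passes: first compute the
-- token start positions from a pairwise scan of adjacent characters, then slice the text at those
-- cuts (objective: alternative; same output).

-- shared predicate: 'a' <= ch.lower() <= 'z'
def pvIsLet (c : Char) : Bool := 'a' ≤ PySem.Chars.lowerChar c && PySem.Chars.lowerChar c ≤ 'z'

-- ===== PORT A =====
-- the for-loop of A, state = (tokens, buf); final flush at []
def pvLoopA : List Char → List String → List Char → List String
  | [], tokens, buf => if buf.isEmpty then tokens else tokens ++ [String.ofList buf]
  | ch :: rest, tokens, buf =>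
    if pvIsLet ch then pvLoopA rest tokens (buf ++ [ch])
    else pvLoopA rest ((if buf.isEmpty then tokens else tokens ++ [String.ofList buf]) ++ [String.ofList [ch]]) []

def tokenize_mixed (text : String) : List String := pvLoopA text.toList [] []

-- ===== PORT B =====
-- stage 1: starts = [0] + [i+1 for i,(x,y) in enumerate(zip(text, text[1:])) if not (is_let(x) and is_let(y))]
def pvStarts (cs : List Char) : List Int :=
  0 :: ((PySem.List.enumerate (cs.zip (cs.drop 1)) 0).filterMap
        (fun p => if !(pvIsLet p.2.1 && pvIsLet p.2.2) then some (p.1 + 1) else none))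

-- stage 2: ends = starts[1:] + [len(text)]; [text[a:b] for a,b in zip(starts, ends)]
def tokenize_mixed_alt (text : String) : List String :=
  let cs := text.toList
  if cs.isEmpty then []
  else
    let starts := pvStarts cs
    let ends := starts.drop 1 ++ [(cs.length : Int)]
    (starts.zip ends).map (fun ab => String.ofList (PySem.List.slice cs (some ab.1) (some ab.2)))

-- ===== PRECONDITION & SPEC =====
def Spec_tokenize_mixed (text : String) (out : List String) : Prop := out = tokenize_mixed_alt text
instance (text : String) (out : List String) : Decidable (Spec_tokenize_mixed text out) := by unfold Spec_tokenize_mixed; infer_instance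

-- ===== CLAIM (what is proved, stated in full; the proofs are below) =====
def Claim_equal_tokenize_mixed : Prop := ∀ (text : String), Dom_tokenize_mixed text → Spec_tokenize_mixed text (tokenize_mixed text)

-- ===== LEMMAS AND PROOFS =====

-- the letter-run decomposition both programs compute, at the List-Char level
def pvGroupsC : List Char → List (List Char)
  | [] => []
  | c :: cs =>
    if pvIsLet c then
      (c :: cs.takeWhile pvIsLet) :: pvGroupsC (cs.dropWhile pvIsLet)
    else
      [c] :: pvGroupsC cs
  termination_by l => l.length
  decreasing_by
    · exact Nat.lt_succ_of_le (cs.length_dropWhile_le pvIsLet)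
    · exact Nat.lt_succ_self _

-- A-side: pending buffer prepended to the first letter group
def pvGroupsC' (buf : List Char) (cs : List Char) : List (List Char) :=
  if buf.isEmpty then pvGroupsC cs
  else (buf ++ cs.takeWhile pvIsLet) :: pvGroupsC (cs.dropWhile pvIsLet)

lemma pvLoopA_eq (cs : List Char) : ∀ (tokens : List String) (buf : List Char),
    pvLoopA cs tokens buf = tokens ++ (pvGroupsC' buf cs).map String.ofList := by
  induction cs with
  | nil =>
    intro tokens buf
    cases buf <;> simp [pvLoopA, pvGroupsC', pvGroupsC]
  | cons c rest ih =>
    intro tokens buf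
    by_cases h : pvIsLet c = true
    · rw [pvLoopA, if_pos h, ih]
      cases buf with
      | nil => simp [pvGroupsC', pvGroupsC, h]
      | cons b bs => simp [pvGroupsC', h]
    · rw [pvLoopA, if_neg h, ih]
      cases buf with
      | nil => simp [pvGroupsC', pvGroupsC, h]
      | cons b bs => simp [pvGroupsC', pvGroupsC, h]

-- B-side: the inner boundary positions, structurally
def pvBn : List Char → List Nat
  | x :: y :: rest =>
    (if !(pvIsLet x && pvIsLet y) then [1] else []) ++ (pvBn (y :: rest)).map (· + 1)
  | _ => []

lemma pvBn_aux : ∀ (cs : List Char) (k : Nat),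
    (PySem.List.enumerate (cs.zip (cs.drop 1)) (k : Int)).filterMap
        (fun p => if !(pvIsLet p.2.1 && pvIsLet p.2.2) then some (p.1 + 1) else none)
      = (pvBn cs).map (fun n : Nat => ((n + k : Nat) : Int)) := by
  intro cs
  induction cs with
  | nil => intro k; simp [pvBn, PySem.List.enumerate_nil]
  | cons x t ih =>
    intro k
    cases t with
    | nil => simp [pvBn, PySem.List.enumerate_nil]
    | cons y rest =>
      have h := ih (k + 1)
      simp only [List.drop_one, List.tail_cons] at h
      push_cast at h
      simp only [List.drop_succ_cons, List.drop_zero, List.zip_cons_cons,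
        PySem.List.enumerate_cons, List.filterMap_cons]
      rw [h]
      by_cases hb : (pvIsLet x && pvIsLet y) = true
      · simp only [pvBn, hb, Bool.not_true, Bool.false_eq_true, reduceIte, List.nil_append,
          List.map_map]
        apply List.map_congr_left
        intro a _
        simp only [Function.comp_apply]
        omega
      · have hb' : (!(pvIsLet x && pvIsLet y)) = true := by simp [hb]
        simp only [pvBn, hb', reduceIte, List.cons_append,
          List.nil_append, List.map_cons, List.map_map, List.cons.injEq]
        refine ⟨by omega, ?_⟩
        apply List.map_congr_left
        intro a _
        simp only [Function.comp_apply]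
        omega

lemma pvStarts_eq (cs : List Char) : pvStarts cs = (0 :: pvBn cs).map (fun n : Nat => (n : Int)) := by
  unfold pvStarts
  have h := pvBn_aux cs 0
  simp only [Nat.cast_zero, Nat.add_zero] at h
  rw [h]
  simp

-- slices of cs at consecutive cut positions, List-Char level, Nat cuts
def pvSlC (cs : List Char) (ss : List Nat) : List (List Char) :=
  (ss.zip (ss.drop 1 ++ [cs.length])).map (fun ab => (cs.drop ab.1).take (ab.2 - ab.1))

lemma pvSlC_cons (cs : List Char) (s : Nat) (ss : List Nat) :
    pvSlC cs (0 :: s :: ss) = cs.take s :: pvSlC cs (s :: ss) := by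
  simp [pvSlC]

lemma pvSlC_shift (c : Char) (cs : List Char) (ss : List Nat) :
    pvSlC (c :: cs) (ss.map (· + 1)) = pvSlC cs ss := by
  unfold pvSlC
  have h1 : (ss.map (· + 1)).drop 1 ++ [(c :: cs).length] = (ss.drop 1 ++ [cs.length]).map (· + 1) := by
    simp
  rw [h1, List.zip_map, List.map_map]
  apply List.map_congr_left
  intro ab _
  simp [Nat.succ_sub_succ]

lemma pvSlC_consFirst (c : Char) (cs : List Char) (ss : List Nat) :
    pvSlC (c :: cs) (0 :: ss.map (· + 1)) =
      (match pvSlC cs (0 :: ss) with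
       | [] => []
       | t :: ts => (c :: t) :: ts) := by
  cases ss with
  | nil =>
    simp [pvSlC]
  | cons s ss' =>
    have h1 : (0 : Nat) :: (s :: ss').map (· + 1) = 0 :: (s + 1) :: ss'.map (· + 1) := by simp
    rw [h1, pvSlC_cons, pvSlC_cons]
    have h2 : (s + 1) :: ss'.map (· + 1) = ((s :: ss').map (· + 1)) := by simp
    rw [h2, pvSlC_shift]
    simp

lemma pvSlC_groups (cs : List Char) (h : cs ≠ []) :
    pvSlC cs (0 :: pvBn cs) = pvGroupsC cs := by
  induction cs with
  | nil => exact absurd rfl h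
  | cons c rest ih =>
    cases rest with
    | nil =>
      by_cases hc : pvIsLet c = true <;> simp [pvBn, pvSlC, pvGroupsC, hc]
    | cons y r =>
      have ihr := ih (by simp)
      by_cases hb : (pvIsLet c && pvIsLet y) = true
      · -- no boundary between c and y: both are letters
        have hc : pvIsLet c = true := by
          rcases Bool.and_eq_true_iff.mp hb with ⟨h1, _⟩; exact h1
        have hy : pvIsLet y = true := by
          rcases Bool.and_eq_true_iff.mp hb with ⟨_, h2⟩; exact h2
        have hbn : pvBn (c :: y :: r) = (pvBn (y :: r)).map (· + 1) := by
          simp [pvBn, hb]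
        rw [hbn, pvSlC_consFirst, ihr]
        have hg : pvGroupsC (c :: y :: r) =
            (c :: (y :: r).takeWhile pvIsLet) :: pvGroupsC ((y :: r).dropWhile pvIsLet) := by
          rw [pvGroupsC]; simp [hc]
        have hgy : pvGroupsC (y :: r) =
            (y :: r.takeWhile pvIsLet) :: pvGroupsC (r.dropWhile pvIsLet) := by
          rw [pvGroupsC]; simp [hy]
        rw [hgy, hg]
        simp [hy]
      · -- boundary at position 1
        have hbn : pvBn (c :: y :: r) = 1 :: (pvBn (y :: r)).map (· + 1) := by
          have hb' : (!(pvIsLet c && pvIsLet y)) = true := by simp [hb]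
          simp [pvBn, hb']
        have h1 : (1 : Nat) :: (pvBn (y :: r)).map (· + 1) = ((0 :: pvBn (y :: r)).map (· + 1)) := by
          simp
        rw [hbn, pvSlC_cons, h1, pvSlC_shift, ihr]
        by_cases hc : pvIsLet c = true
        · have hy : pvIsLet y = false := by
            cases hyy : pvIsLet y with
            | false => rfl
            | true => exact absurd (by simp [hc, hyy]) hb
          have hg : pvGroupsC (c :: y :: r) =
              (c :: (y :: r).takeWhile pvIsLet) :: pvGroupsC ((y :: r).dropWhile pvIsLet) := by
            rw [pvGroupsC]; simp [hc]
          rw [hg]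
          simp [hy]
        · have hg : pvGroupsC (c :: y :: r) = [c] :: pvGroupsC (y :: r) := by
            rw [pvGroupsC]; simp [hc]
          rw [hg]
          simp

lemma pvSlices_eq (c : Char) (rest : List Char) (ss : List Nat) :
    ((ss.map (fun n : Nat => (n : Int))).zip
        ((ss.map (fun n : Nat => (n : Int))).drop 1 ++ [((c :: rest).length : Int)])).map
      (fun ab => String.ofList (PySem.List.slice (c :: rest) (some ab.1) (some ab.2)))
    = (pvSlC (c :: rest) ss).map String.ofList := by
  have hdrop : (ss.map (fun n : Nat => (n : Int))).drop 1 ++ [((c :: rest).length : Int)]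
      = (ss.drop 1 ++ [(c :: rest).length]).map (fun n : Nat => (n : Int)) := by simp
  rw [hdrop, List.zip_map]
  unfold pvSlC
  rw [List.map_map, List.map_map]
  apply List.map_congr_left
  intro ab _
  simp [PySem.List.slice_natCast]

-- ===== VERDICT (by name: the statement is the Claim_ definition above) =====
theorem tokenize_mixed_spec : Claim_equal_tokenize_mixed := by
  intro text _
  unfold Spec_tokenize_mixed tokenize_mixed tokenize_mixed_alt
  rw [pvLoopA_eq]
  simp only [List.nil_append]
  cases hcs : text.toList with
  | nil => simp [pvGroupsC', pvGroupsC]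
  | cons c rest =>
    simp only [List.isEmpty_cons, Bool.false_eq_true, reduceIte, pvStarts_eq]
    rw [pvSlices_eq, pvSlC_groups _ (by simp)]
    simp [pvGroupsC']
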